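-- pv_equiv track=rewrite | github.com/vedanta28/cppToRust | Utils.py | printfReplacer
-- ===== SOURCE A (Python) =====
-- def printfReplacer(LiteralText):
--
--     printFormatsList = ['%d', '%c', '%s', '%f']
--     new_string = LiteralText
--
--     for format in printFormatsList:
--         old_substring = format
--         new_substring = "{}"
--
--         split_list = new_string.split(old_substring)
--         if len(split_list) > 1:
--             new_list = [new_substring if i < len(
--                 split_list)-1 else '' for i in range(len(split_list)-1)]
--             new_string = ''.join([split_list[i] + new_list[i]
--                                  for i in range(len(split_list)-1)] + [split_list[-1]])
--
--     return new_string
-- ===== SOURCE B (Python) =====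
-- def printfReplacer(LiteralText):
--     out = []
--     i = 0
--     n = len(LiteralText)
--     while i < n:
--         if LiteralText[i] == '%' and i + 1 < n and LiteralText[i + 1] in 'dcsf':
--             out.append('{}')
--             i += 2
--         else:
--             out.append(LiteralText[i])
--             i += 1
--     return ''.join(out)
-- ===== Notes on version B (the rewrite author's own statement) =====
-- stated objective: idiomatic
-- what changed: B replaces the four sequential split/join rebuild passes (one per specifier) with a single left-to-right scan that emits '{}' when '%' is followed by one of d/c/s/f and copies the character otherwise.
import Mathlib
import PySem

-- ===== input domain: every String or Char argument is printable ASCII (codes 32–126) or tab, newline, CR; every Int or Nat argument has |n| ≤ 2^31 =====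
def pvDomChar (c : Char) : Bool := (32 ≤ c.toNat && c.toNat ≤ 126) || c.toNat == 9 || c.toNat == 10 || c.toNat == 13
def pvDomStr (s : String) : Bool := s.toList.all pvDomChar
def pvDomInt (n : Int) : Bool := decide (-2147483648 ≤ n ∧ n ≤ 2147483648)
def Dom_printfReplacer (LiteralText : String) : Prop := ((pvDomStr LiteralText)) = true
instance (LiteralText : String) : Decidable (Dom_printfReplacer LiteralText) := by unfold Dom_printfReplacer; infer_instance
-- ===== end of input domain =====

-- B replaces A's four sequential split/join rebuild passes (one per format specifier) with a single left-to-right scan; return values proved equal on all inputs.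

-- ===== PORT A =====
-- the body of A's 'for format in printFormatsList' loop, transliterated (split, build new_list, join)
def pyReplacePass (new_string old_substring : List Char) : List Char :=
  let new_substring : List Char := ['{', '}']
  let split_list := PySem.Chars.splitOn new_string old_substring
  if 1 < split_list.length then
    let n : Int := (split_list.length : Int)
    let new_list := (PySem.List.pyRange 0 (n - 1) 1).map
      (fun i => if i < n - 1 then new_substring else [])
    PySem.Chars.join []
      (((PySem.List.pyRange 0 (n - 1) 1).map
          (fun i => PySem.List.pyGetD split_list i [] ++ PySem.List.pyGetD new_list i []))
        ++ [PySem.List.pyGetD split_list (-1) []])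
  else new_string

def printfReplacerCore (cs : List Char) : List Char :=
  let printFormatsList : List (List Char) := [['%','d'], ['%','c'], ['%','s'], ['%','f']]
  printFormatsList.foldl (fun new_string format => pyReplacePass new_string format) cs

def printfReplacer (LiteralText : String) : String :=
  String.ofList (printfReplacerCore LiteralText.toList)

-- ===== PORT B =====
-- single pass: when '%' is followed by one of d/c/s/f emit '{}' and skip both, else copy one char
def altCore : List Char → List Char
  | [] => []
  | '%' :: c :: rest =>
      if c ∈ ['d', 'c', 's', 'f'] then '{' :: '}' :: altCore rest
      else '%' :: altCore (c :: rest)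
  | c :: rest => c :: altCore rest
termination_by l => l.length
decreasing_by all_goals simp

def printfReplacer_alt (LiteralText : String) : String :=
  String.ofList (altCore LiteralText.toList)

-- ===== PRECONDITION & SPEC =====
def Spec_printfReplacer (LiteralText : String) (out : String) : Prop := out = printfReplacer_alt LiteralText
instance (LiteralText : String) (out : String) : Decidable (Spec_printfReplacer LiteralText out) := by unfold Spec_printfReplacer; infer_instance

-- ===== CLAIM (what is proved, stated in full; the proofs are below) =====
def Claim_equal_printfReplacer : Prop := ∀ (LiteralText : String), Dom_printfReplacer LiteralText → Spec_printfReplacer LiteralText (printfReplacer LiteralText)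

-- ===== LEMMAS AND PROOFS =====

-- replace-all of the single two-char pattern ['%', k] (k ≠ '%'): the effect of one pass of A
def rep (k : Char) : List Char → List Char
  | [] => []
  | '%' :: x :: rest => if x = k then '{' :: '}' :: rep k rest else '%' :: rep k (x :: rest)
  | c :: rest => c :: rep k rest
termination_by l => l.length
decreasing_by all_goals simp

-- pure-recursion view of PySem.Chars.splitOn on the pattern ['%', k]
def mySplit (k : Char) : List Char → List (List Char)
  | [] => [[]]
  | '%' :: x :: rest =>
      if x = k then [] :: mySplit k rest
      else List.modifyHead (fun p => '%' :: p) (mySplit k (x :: rest))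
  | c :: rest => List.modifyHead (fun p => c :: p) (mySplit k rest)
termination_by l => l.length
decreasing_by all_goals simp

-- one-pass replacer parametrized by the set of specifier letters handled so far
def altS (S : List Char) : List Char → List Char
  | [] => []
  | '%' :: c :: rest =>
      if c ∈ S then '{' :: '}' :: altS S rest
      else '%' :: altS S (c :: rest)
  | c :: rest => c :: altS S rest
termination_by l => l.length
decreasing_by all_goals simp

theorem mySplit_ne_nil (k : Char) (l : List Char) : mySplit k l ≠ [] := by
  fun_induction mySplit k l <;> simp_all [List.modifyHead_eq_nil_iff]

theorem inter_cons_ne (sep a : List Char) (ps : List (List Char)) (h : ps ≠ []) :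
    List.intercalate sep (a :: ps) = a ++ sep ++ List.intercalate sep ps := by
  cases ps with
  | nil => simp at h
  | cons b t => simp [List.intercalate, List.intersperse]

theorem inter_modifyHead (sep : List Char) (c : Char) (ps : List (List Char)) (h : ps ≠ []) :
    List.intercalate sep (List.modifyHead (fun p => c :: p) ps) = c :: List.intercalate sep ps := by
  cases ps with
  | nil => simp at h
  | cons a t => cases t with
    | nil => simp [List.intercalate]
    | cons b u => simp [List.modifyHead, List.intercalate, List.intersperse]

theorem intercalate_mySplit (k : Char) (l : List Char) :
    List.intercalate ['{', '}'] (mySplit k l) = rep k l := by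
  fun_induction mySplit k l with
  | case1 => simp [List.intercalate, rep]
  | case2 rest ih =>
      rw [inter_cons_ne _ _ _ (mySplit_ne_nil _ _)]
      simp [rep, ih]
  | case3 x rest hx ih =>
      rw [inter_modifyHead _ _ _ (mySplit_ne_nil _ _), ih]
      simp [rep, hx]
  | case4 c rest hne ih =>
      rw [inter_modifyHead _ _ _ (mySplit_ne_nil _ _), ih]
      cases rest with
      | nil => cases c <;> simp [rep]
      | cons d r =>
        by_cases hc : c = '%'
        · subst hc; exact (hne d r rfl rfl).elim
        · simp [rep, hc]

theorem mySplit_singleton (k : Char) (l p : List Char)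
    (h : mySplit k l = [p]) : p = l := by
  induction l using mySplit.induct k generalizing p with
  | case1 => simp [mySplit] at h; simp [h]
  | case2 rest ih =>
      rw [mySplit] at h
      · have := mySplit_ne_nil k rest
        simp at h
        exact absurd h.2 this
  | case3 x rest hx ih =>
      rw [mySplit] at h
      rw [if_neg hx] at h
      cases h' : mySplit k (x :: rest) with
      | nil => exact absurd h' (mySplit_ne_nil _ _)
      | cons q t =>
        rw [h'] at h
        simp [List.modifyHead] at h
        obtain ⟨hp, ht⟩ := h
        subst ht
        rw [← hp, ih q h']
  | case4 c rest hne ih =>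
      rw [mySplit] at h
      · cases h' : mySplit k rest with
        | nil => exact absurd h' (mySplit_ne_nil _ _)
        | cons q t =>
          rw [h'] at h
          simp [List.modifyHead] at h
          obtain ⟨hp, ht⟩ := h
          subst ht
          rw [← hp, ih q h']
      · exact hne

theorem go_spec (k : Char) (hk : k ≠ '%') (fuel : Nat) :
    ∀ (l cur : List Char) (acc : List (List Char)), l.length < fuel →
    PySem.Chars.splitOn.go ['%', k] fuel l cur acc
      = acc.reverse ++ (mySplit k l).modifyHead (fun p => cur.reverse ++ p) := by
  induction fuel with
  | zero => intro l cur acc h; omega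
  | succ fuel ih =>
    intro l cur acc h
    cases l with
    | nil => simp [PySem.Chars.splitOn.go, mySplit]
    | cons c rest =>
      rw [PySem.Chars.splitOn.go]
      by_cases hpre : List.isPrefixOf ['%', k] (c :: rest) = true
      · rw [if_pos hpre]
        obtain ⟨hc, rest', hr⟩ : c = '%' ∧ ∃ r', rest = k :: r' := by
          cases rest with
          | nil => simp [List.isPrefixOf] at hpre
          | cons d r => simp [List.isPrefixOf] at hpre; exact ⟨hpre.1.symm, r, by rw [hpre.2]⟩
        subst hc; subst hr
        simp at h
        have hdrop : List.drop (['%', k].length) ('%' :: k :: rest') = rest' := by simp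
        rw [hdrop, ih rest' [] (cur.reverse :: acc) (by omega)]
        rw [mySplit, if_pos rfl]
        simp [List.modifyHead]
        cases mySplit k rest' <;> rfl
      · rw [if_neg hpre]
        simp at h
        rw [ih rest (c :: cur) acc (by omega)]
        have hms : mySplit k (c :: rest) = List.modifyHead (fun p => c :: p) (mySplit k rest) := by
          by_cases hc : c = '%'
          · subst hc
            cases rest with
            | nil => simp [mySplit, List.modifyHead]
            | cons d r =>
              have hdk : d ≠ k := by
                intro hdk; subst hdk; simp [List.isPrefixOf] at hpre
              rw [mySplit, if_neg hdk]
          · rw [mySplit]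
            intro x r h1 h2; exact hc h1
        rw [hms, List.modifyHead_modifyHead]
        have hfun : (fun p => (c :: cur).reverse ++ p) = (fun p => cur.reverse ++ c :: p) := by
          funext p; simp
        rw [hfun]
        rfl

theorem splitOn_eq_mySplit (k : Char) (hk : k ≠ '%') (l : List Char) :
    PySem.Chars.splitOn l ['%', k] = mySplit k l := by
  rw [PySem.Chars.splitOn, go_spec k hk (l.length + 1) l [] [] (by omega)]
  cases h : mySplit k l with
  | nil => exact absurd h (mySplit_ne_nil _ _)
  | cons a t => simp [List.modifyHead]

theorem pyGetD_neg_one (ps : List (List Char)) (h : ps ≠ []) :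
    PySem.List.pyGetD ps (-1) [] = ps.getD (ps.length - 1) [] := by
  have hl : 0 < ps.length := List.length_pos_iff.mpr h
  simp [PySem.List.pyGetD, PySem.List.pyGet?, PySem.List.pyIdx?, List.getD]
  rw [if_pos (by omega : 1 ≤ ps.length)]
  simp

theorem interJ (br : List Char) : ∀ ps : List (List Char), ps ≠ [] →
    List.intercalate [] ((List.range (ps.length - 1)).map (fun i => ps.getD i [] ++ br)
      ++ [ps.getD (ps.length - 1) []]) = List.intercalate br ps := by
  intro ps
  induction ps with
  | nil => simp
  | cons p ps' ih =>
    intro _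
    cases ps' with
    | nil => simp [List.intercalate]
    | cons q t =>
      have hlen : (p :: q :: t).length - 1 = t.length + 1 := by simp
      rw [hlen, List.range_succ_eq_map]
      have hmap : (List.map (fun i => (p :: q :: t).getD i [] ++ br) (0 :: List.map (· + 1) (List.range t.length)))
          = (p ++ br) :: List.map (fun i => (q :: t).getD i [] ++ br) (List.range t.length) := by
        simp [List.map_map, Function.comp]
      rw [hmap]
      have hlast : (p :: q :: t).getD (t.length + 1) [] = (q :: t).getD ((q :: t).length - 1) [] := by
        simp; rfl
      rw [hlast]
      simp only [List.length_cons, Nat.add_sub_cancel] at ih ⊢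
      rw [List.cons_append, inter_cons_ne [] _ _ (by simp), ih (by simp)]
      rw [inter_cons_ne br p (q :: t) (by simp)]
      simp

theorem build_eq_intercalate (ps : List (List Char)) (br : List Char) (h2 : 1 < ps.length) :
    PySem.Chars.join []
      (((PySem.List.pyRange 0 ((ps.length : Int) - 1) 1).map
          (fun i => PySem.List.pyGetD ps i [] ++
            PySem.List.pyGetD ((PySem.List.pyRange 0 ((ps.length : Int) - 1) 1).map
              (fun i => if i < (ps.length : Int) - 1 then br else [])) i []))
        ++ [PySem.List.pyGetD ps (-1) []]) = List.intercalate br ps := by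
  have hm : ((ps.length : Int) - 1 - 0).toNat = ps.length - 1 := by omega
  have hnl : ((PySem.List.pyRange 0 ((ps.length : Int) - 1) 1).map
      (fun i => if i < (ps.length : Int) - 1 then br else [])) = List.replicate (ps.length - 1) br := by
    rw [PySem.List.pyRange_one, hm, List.map_map]
    rw [List.map_congr_left (g := fun _ => br) (by
      intro j hj
      simp at hj ⊢
      omega)]
    simp [List.map_const']
  rw [hnl, PySem.List.pyRange_one, hm, List.map_map]
  rw [List.map_congr_left (g := fun j => ps.getD j [] ++ br) (by
    intro j hj
    simp only [List.mem_range] at hj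
    simp only [Function.comp, zero_add]
    rw [PySem.List.pyGetD_natCast, PySem.List.pyGetD_natCast]
    congr 1
    rw [List.getD_eq_getElem?_getD, List.getElem?_replicate]
    simp [hj])]
  rw [pyGetD_neg_one ps (by intro hh; simp [hh] at h2)]
  exact interJ br ps (by intro hh; simp [hh] at h2)

theorem pass_eq_rep (k : Char) (hk : k ≠ '%') (ns : List Char) :
    pyReplacePass ns ['%', k] = rep k ns := by
  unfold pyReplacePass
  rw [splitOn_eq_mySplit k hk ns]
  by_cases h2 : 1 < (mySplit k ns).length
  · rw [if_pos h2, build_eq_intercalate (mySplit k ns) ['{', '}'] h2, intercalate_mySplit]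
  · rw [if_neg h2]
    have h1 : (mySplit k ns).length = 1 := by
      have := mySplit_ne_nil k ns
      have : 0 < (mySplit k ns).length := List.length_pos_iff.mpr this
      omega
    obtain ⟨p, hp⟩ := List.length_eq_one_iff.mp h1
    have hpns : p = ns := mySplit_singleton k ns p hp
    have := intercalate_mySplit k ns
    rw [hp] at this
    simp [List.intercalate] at this
    rw [← this, hpns]

theorem altS_cons_ne (S : List Char) (c : Char) (rest : List Char) (hc : c ≠ '%') :
    altS S (c :: rest) = c :: altS S rest := by
  rw [altS]
  intro x r h1 h2; exact hc h1

theorem altS_single (S : List Char) (c : Char) : altS S [c] = [c] := by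
  by_cases hc : c = '%'
  · subst hc; simp [altS]
  · rw [altS_cons_ne S c [] hc, altS]

theorem head_altS (S : List Char) (c : Char) (l : List Char) :
    ∃ h t', altS S (c :: l) = h :: t' ∧ (h = c ∨ h = '{') := by
  by_cases hc : c = '%'
  · subst hc
    cases l with
    | nil => exact ⟨'%', [], altS_single S '%', Or.inl rfl⟩
    | cons y r =>
      rw [altS]
      by_cases hy : y ∈ S
      · exact ⟨'{', '}' :: altS S r, by rw [if_pos hy], Or.inr rfl⟩
      · exact ⟨'%', altS S (y :: r), by rw [if_neg hy], Or.inl rfl⟩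
  · exact ⟨c, altS S l, altS_cons_ne S c l hc, Or.inl rfl⟩

theorem rep_cons_ne (k c : Char) (rest : List Char) (hc : c ≠ '%') :
    rep k (c :: rest) = c :: rep k rest := by
  rw [rep]
  intro x r h1 h2; exact hc h1

theorem rep_altS (k : Char) (S : List Char) (hk : k ≠ '%') (hkb : k ≠ '{') (hp : '%' ∉ S) :
    ∀ (cs : List Char), rep k (altS S cs) = altS (S ++ [k]) cs := by
  have main : ∀ (n : Nat) (cs : List Char), cs.length ≤ n →
      rep k (altS S cs) = altS (S ++ [k]) cs := by
    intro n
    induction n with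
    | zero =>
      intro cs h
      have : cs = [] := List.eq_nil_of_length_eq_zero (by omega)
      subst this; simp [altS, rep]
    | succ n ih =>
      intro cs hlen
      match cs with
      | [] => simp [altS, rep]
      | [c] => rw [altS_single, altS_single]; by_cases hc : c = '%'
               · subst hc; simp [rep]
               · rw [rep_cons_ne k c [] hc, rep]
      | c1 :: c2 :: rest =>
        by_cases hc1 : c1 = '%'
        · subst hc1
          by_cases h2S : c2 ∈ S
          · rw [altS, if_pos h2S, altS, if_pos (by simp [h2S])]
            rw [rep_cons_ne k '{' _ (by decide), rep_cons_ne k '}' _ (by decide)]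
            rw [ih rest (by simp at hlen; omega)]
          · by_cases h2k : c2 = k
            · subst h2k
              rw [altS, if_neg h2S, altS_cons_ne S c2 rest hk]
              rw [rep, if_pos rfl, ih rest (by simp at hlen; omega)]
              rw [altS, if_pos (by simp)]
            · by_cases h2p : c2 = '%'
              · subst h2p
                rw [altS, if_neg h2S]
                obtain ⟨h, t', hht, hcase⟩ := head_altS S '%' rest
                rw [hht, rep, if_neg (by rcases hcase with h1 | h1 <;> subst h1
                                         · exact fun hh => hk hh.symm
                                         · exact fun hh => hkb hh.symm), ← hht]
                rw [ih ('%' :: rest) (by simp at hlen ⊢; omega)]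
                have hpk : ('%' : Char) ∉ S ++ [k] := by
                  simp [hp]; exact fun hh => hk hh.symm
                conv_rhs => rw [altS]
                rw [if_neg hpk]
              · rw [altS, if_neg h2S, altS_cons_ne S c2 rest h2p]
                rw [rep, if_neg h2k, rep_cons_ne k c2 _ h2p]
                rw [ih rest (by simp at hlen; omega)]
                have h2sk : c2 ∉ S ++ [k] := by simp [h2S, h2k]
                conv_rhs => rw [altS]
                rw [if_neg h2sk, altS_cons_ne (S ++ [k]) c2 rest h2p]
        · rw [altS_cons_ne S c1 _ hc1, rep_cons_ne k c1 _ hc1,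
              ih (c2 :: rest) (by simp at hlen ⊢; omega),
              altS_cons_ne (S ++ [k]) c1 _ hc1]
  intro cs; exact main cs.length cs le_rfl

theorem altS_nil_id (cs : List Char) : altS [] cs = cs := by
  fun_induction altS [] cs <;> simp_all

theorem altCore_eq_altS (cs : List Char) : altCore cs = altS ['d', 'c', 's', 'f'] cs := by
  fun_induction altCore cs with
  | case1 => simp [altS]
  | case2 c rest hmem ih => rw [altS, if_pos hmem, ih]
  | case3 c rest hmem ih => rw [altS, if_neg hmem, ih]
  | case4 c rest hne ih =>
      by_cases hc : c = '%'
      · subst hc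
        cases rest with
        | nil => rw [altS_single]; simp [altCore]
        | cons d r => exact (hne d r rfl rfl).elim
      · rw [altS_cons_ne _ c rest hc, ih]

theorem core_eq (cs : List Char) : printfReplacerCore cs = altCore cs := by
  unfold printfReplacerCore
  simp only [List.foldl]
  rw [pass_eq_rep 'd' (by decide), pass_eq_rep 'c' (by decide),
      pass_eq_rep 's' (by decide), pass_eq_rep 'f' (by decide)]
  rw [show rep 'd' cs = rep 'd' (altS [] cs) from by rw [altS_nil_id]]
  rw [rep_altS 'd' [] (by decide) (by decide) (by decide)]
  simp only [List.nil_append, List.cons_append, List.append_nil, List.singleton_append]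
  rw [rep_altS 'c' ['d'] (by decide) (by decide) (by decide)]
  simp only [List.nil_append, List.cons_append, List.append_nil, List.singleton_append]
  rw [rep_altS 's' ['d', 'c'] (by decide) (by decide) (by decide)]
  simp only [List.nil_append, List.cons_append, List.append_nil, List.singleton_append]
  rw [rep_altS 'f' ['d', 'c', 's'] (by decide) (by decide) (by decide)]
  simp only [List.nil_append, List.cons_append, List.append_nil, List.singleton_append]
  rw [altCore_eq_altS]

-- ===== VERDICT (by name: the statement is the Claim_ definition above) =====
theorem printfReplacer_spec : Claim_equal_printfReplacer := by
  intro s _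
  unfold Spec_printfReplacer printfReplacer printfReplacer_alt
  rw [core_eq]
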